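-- pv_equiv track=rewrite | github.com/Paol96/NLTK | programma1.py | calcolaVoc_Hapax
-- ===== SOURCE A (Python) =====
-- def hapax (listaToken,vocabolario):
--     conta = 0
--     for tok in vocabolario:
--         frequenzaToken = listaToken.count(tok) #calcolo la frequenza di quel token  in quel corpus
--         if frequenzaToken == 1: #se la frequenza del token è 1 è un hapax
--             conta = conta + 1 #conto quanti hapax trovo
--     return conta #restituisco il risultato
--
-- def calcolaVoc_Hapax (listaToken, numToken):
--     n = 1000 #contatore per scorrere token
--     listaVocabolario = [] #creo lista dove inserire i risultati del vocabolario per le porzioni incrementali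
--     listaHapax = [] #creo lista dove inserire i risultati degli hapax per le porzioni incrementali
--     while n < numToken: #finchè non viene superato il numero di token calcolo il vocabolario e hapax
--         vocabolario = set(listaToken[:n])#calcolo vocabolario sui primi n token
--         grandezzaVocabolario = len(vocabolario)
--         listaVocabolario.append(grandezzaVocabolario)#inserisco i valori ottenuti nella lista
--         numeroHapax = hapax(listaToken[:n],vocabolario) #richiamo la funzione per contare gli hapax
--         listaHapax.append(numeroHapax) #inserisco i risultati nella lista
--         n += 1000 #aggiorno il contatore
--     return listaVocabolario, listaHapax #restituisco i risultati
-- ===== SOURCE B (Python) =====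
-- def calcolaVoc_Hapax(listaToken, numToken):
--     conteggi = {}          # frequency of each token seen so far
--     distinti = 0           # current vocabulary size
--     hapaxCorrenti = 0      # current number of frequency-1 tokens
--     listaVocabolario = []
--     listaHapax = []
--     i = 0
--     for n in range(1000, numToken, 1000):
--         for tok in listaToken[i:n]:
--             c = conteggi.get(tok, 0)
--             if c == 0:
--                 distinti += 1
--                 hapaxCorrenti += 1
--             elif c == 1:
--                 hapaxCorrenti -= 1
--             conteggi[tok] = c + 1
--         i = n
--         listaVocabolario.append(distinti)
--         listaHapax.append(hapaxCorrenti)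
--     return listaVocabolario, listaHapax
-- ===== Notes on version B (the rewrite author's own statement) =====
-- stated objective: faster
-- what changed: Replaces the per-checkpoint set rebuild and quadratic hapax recount (list.count for every vocabulary word on every 1000-token prefix) with one incremental pass that maintains a frequency dictionary plus running distinct and hapax counters, snapshotting them at each 1000-token checkpoint.
import Mathlib
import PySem

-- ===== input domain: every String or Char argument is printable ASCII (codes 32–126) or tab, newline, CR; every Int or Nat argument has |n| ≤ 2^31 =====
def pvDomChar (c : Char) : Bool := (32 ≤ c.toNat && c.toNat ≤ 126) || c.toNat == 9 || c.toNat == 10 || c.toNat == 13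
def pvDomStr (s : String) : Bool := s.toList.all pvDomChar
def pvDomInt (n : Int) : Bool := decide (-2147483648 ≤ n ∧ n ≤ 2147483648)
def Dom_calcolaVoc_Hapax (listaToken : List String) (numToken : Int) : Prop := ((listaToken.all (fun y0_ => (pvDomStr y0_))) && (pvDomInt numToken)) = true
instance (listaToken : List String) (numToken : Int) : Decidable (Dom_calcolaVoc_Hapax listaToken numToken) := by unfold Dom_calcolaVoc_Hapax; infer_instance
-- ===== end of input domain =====

-- B replaces A's per-checkpoint set rebuild and quadratic hapax recount by a single
-- incremental pass with a frequency dictionary and running distinct/hapax counters (faster).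


-- ===== PORT A =====
-- hapax(listaToken, vocabolario): counts vocabulary words of frequency 1 (rescans the list per word)
def pvHapax (listaToken : List String) (vocabolario : List String) : Int :=
  vocabolario.foldl (fun conta tok =>
    if PySem.List.count listaToken tok == 1 then conta + 1 else conta) 0

-- the while-loop of A: n = 1000, 2000, … while n < numToken, appending to the two lists
def pvLoopA (listaToken : List String) (numToken : Int) (n : Int) (lv lh : List Int) :
    List Int × List Int :=
  if _h : n < numToken then
    let vocabolario := PySem.Set.ofList (PySem.List.slice listaToken none (some n))
    let lv' := lv ++ [PySem.Set.len vocabolario]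
    let lh' := lh ++ [pvHapax (PySem.List.slice listaToken none (some n)) vocabolario]
    pvLoopA listaToken numToken (n + 1000) lv' lh'
  else (lv, lh)
termination_by (numToken - n).toNat
decreasing_by omega

def calcolaVoc_Hapax (listaToken : List String) (numToken : Int) : List Int × List Int :=
  pvLoopA listaToken numToken 1000 [] []

-- ===== PORT B =====
-- one token of the incremental pass: update frequency dict, distinct count, hapax count
def pvStep (st : PySem.Dict String Int × Int × Int) (tok : String) :
    PySem.Dict String Int × Int × Int :=
  let c := st.1.getD tok 0
  let d := if c == 0 then st.2.1 + 1 else st.2.1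
  let h := if c == 0 then st.2.2 + 1 else if c == 1 then st.2.2 - 1 else st.2.2
  (st.1.insert tok (c + 1), d, h)

-- one checkpoint n: consume listaToken[i:n], set i = n, snapshot the two counters
def pvBStep (listaToken : List String)
    (st : PySem.Dict String Int × Int × Int × Int × List Int × List Int) (n : Int) :
    PySem.Dict String Int × Int × Int × Int × List Int × List Int :=
  let inner := (PySem.List.slice listaToken (some st.2.2.2.1) (some n)).foldl pvStep
    (st.1, st.2.1, st.2.2.1)
  (inner.1, inner.2.1, inner.2.2, n,
   st.2.2.2.2.1 ++ [inner.2.1], st.2.2.2.2.2 ++ [inner.2.2])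

def calcolaVoc_Hapax_alt (listaToken : List String) (numToken : Int) : List Int × List Int :=
  let fin := (PySem.List.pyRange 1000 numToken 1000).foldl (pvBStep listaToken)
    (PySem.Dict.empty, 0, 0, 0, [], [])
  (fin.2.2.2.2.1, fin.2.2.2.2.2)

-- ===== PRECONDITION & SPEC =====
def Spec_calcolaVoc_Hapax (listaToken : List String) (numToken : Int) (out : List Int × List Int) : Prop := out = calcolaVoc_Hapax_alt listaToken numToken
instance (listaToken : List String) (numToken : Int) (out : List Int × List Int) : Decidable (Spec_calcolaVoc_Hapax listaToken numToken out) := by unfold Spec_calcolaVoc_Hapax; infer_instance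

-- ===== CLAIM (what is proved, stated in full; the proofs are below) =====
def Claim_equal_calcolaVoc_Hapax : Prop := ∀ (listaToken : List String) (numToken : Int), Dom_calcolaVoc_Hapax listaToken numToken → Spec_calcolaVoc_Hapax listaToken numToken (calcolaVoc_Hapax listaToken numToken)

-- ===== LEMMAS AND PROOFS =====

-- range(a, b, 1000) unfolds one element at a time
theorem pvRange1000_nil (a b : Int) (h : b ≤ a) : PySem.List.pyRange a b 1000 = [] := by
  rw [PySem.List.pyRange_of_pos a b (by norm_num)]
  rw [if_neg (by omega)]
  rfl

theorem pvRange1000_cons (a b : Int) (h : a < b) :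
    PySem.List.pyRange a b 1000 = a :: PySem.List.pyRange (a + 1000) b 1000 := by
  rw [PySem.List.pyRange_of_pos a b (by norm_num),
      PySem.List.pyRange_of_pos (a + 1000) b (by norm_num)]
  have hN : ((b - a + 1000 - 1) / 1000).toNat =
      (if a + 1000 < b then ((b - (a + 1000) + 1000 - 1) / 1000).toNat else 0) + 1 := by
    split_ifs <;> omega
  rw [if_pos h, hN, List.range_succ_eq_map]
  simp only [List.map_cons, List.map_map]
  refine congrArg₂ List.cons (by push_cast; ring) (List.map_congr_left ?_)
  intro k _
  simp only [Function.comp]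
  push_cast
  ring

-- pvHapax counts the vocabulary entries of frequency 1
theorem pvHapax_countP (L V : List String) :
    pvHapax L V = (V.countP (fun tok => PySem.List.count L tok == 1) : Int) := by
  unfold pvHapax
  rw [PySem.List.foldl_if_add_one (fun tok => PySem.List.count L tok == 1) V 0]
  ring

-- changing a predicate at exactly one element of a duplicate-free list shifts countP by ±1
theorem pvCountP_change {α : Type} [DecidableEq α] (p q : α → Bool) (t : α) :
    ∀ (S : List α), S.Nodup → t ∈ S → (∀ x ∈ S, x ≠ t → p x = q x) →
      (S.countP q : Int) =
        (S.countP p : Int) + (if q t then 1 else 0) - (if p t then 1 else 0) := by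
  intro S
  induction S with
  | nil => simp
  | cons a S ih =>
    intro hnd hmem hpq
    rcases List.mem_cons.mp hmem with rfl | htS
    · have haS : t ∉ S := (List.nodup_cons.mp hnd).1
      have hS : S.countP q = S.countP p := by
        refine (List.countP_congr ?_).symm
        intro x hx
        rw [hpq x (List.mem_cons_of_mem _ hx) (fun he => haS (he ▸ hx))]
      simp only [List.countP_cons, hS]
      split_ifs <;> push_cast <;> omega
    · have hat : a ≠ t := fun he => (List.nodup_cons.mp hnd).1 (he ▸ htS)
      have hpa : p a = q a := hpq a (List.mem_cons_self ..) hat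
      have hih := ih (List.nodup_cons.mp hnd).2 htS
        (fun x hx hxt => hpq x (List.mem_cons_of_mem _ hx) hxt)
      simp only [List.countP_cons, hpa]
      split_ifs at hih ⊢ <;> push_cast at hih ⊢ <;> omega

-- spec of the incremental pass: dict = Counter, counters = |set| and hapax count
theorem pvRun_spec (l : List String) :
    l.foldl pvStep (PySem.Dict.empty, 0, 0) =
      (PySem.Dict.counter l, ((PySem.Set.ofList l).length : Int),
       pvHapax l (PySem.Set.ofList l)) := by
  induction l using List.reverseRecOn with
  | nil => rfl
  | append_singleton l t ih =>
    rw [List.foldl_append, ih]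
    simp only [List.foldl_cons, List.foldl_nil, pvStep]
    rw [PySem.Dict.getD_counter l t]
    simp only [Prod.mk.injEq]
    refine ⟨?_, ?_, ?_⟩
    · -- dictionary component is Counter(l ++ [t])
      have h2 := PySem.Dict.foldl_insert_getD_add_one_eq_counter (l ++ [t])
      rw [List.foldl_append, PySem.Dict.foldl_insert_getD_add_one_eq_counter l] at h2
      simp only [List.foldl_cons, List.foldl_nil] at h2
      rw [← h2, PySem.Dict.getD_counter l t]
    · -- distinct-count component is |set(l ++ [t])|
      rw [PySem.Set.ofList_append_singleton]
      by_cases ht : t ∈ l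
      · rw [PySem.Set.add_of_mem ((PySem.Set.mem_ofList l _).mpr ht)]
        have hc : List.count t l ≠ 0 := by
          simp only [ne_eq, List.count_eq_zero]
          exact fun hmem => hmem ht
        rw [if_neg (by simp [hc])]
      · rw [PySem.Set.add_of_not_mem (fun hm => ht ((PySem.Set.mem_ofList l _).mp hm))]
        rw [if_pos (by simp [List.count_eq_zero_of_not_mem ht])]
        simp
    · -- hapax component
      rw [pvHapax_countP, pvHapax_countP, PySem.Set.ofList_append_singleton]
      by_cases ht : t ∈ l
      · rw [PySem.Set.add_of_mem ((PySem.Set.mem_ofList l _).mpr ht)]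
        have hcpos : 0 < List.count t l := List.count_pos_iff.mpr ht
        have hq : ∀ x ∈ PySem.Set.ofList l, x ≠ t →
            (fun tok => PySem.List.count l tok == 1) x =
            (fun tok => PySem.List.count (l ++ [t]) tok == 1) x := by
          intro x _ hxt
          simp only [PySem.List.count_eq, List.count_append]
          have : List.count x [t] = 0 := by
            simp [List.count_eq_zero, fun he => hxt he]
          rw [this, Nat.add_zero]
        have hch := pvCountP_change _ _ t (PySem.Set.ofList l)
          (PySem.Set.nodup_ofList l) ((PySem.Set.mem_ofList l _).mpr ht) hq
        have hqt : (PySem.List.count (l ++ [t]) t == 1) = false := by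
          simp [PySem.List.count_eq, List.count_append]
          omega
        rw [hqt] at hch
        by_cases h1 : List.count t l = 1
        · have hpt : (PySem.List.count l t == 1) = true := by simp [h1]
          rw [hpt] at hch
          rw [if_neg (by simp; omega), if_pos (by simp [h1])]
          rw [hch]
          norm_num
        · have hpt : (PySem.List.count l t == 1) = false := by simp [h1]
          rw [hpt] at hch
          rw [if_neg (by simp; omega), if_neg (by simp; omega)]
          rw [hch]
          norm_num
      · rw [PySem.Set.add_of_not_mem (fun hm => ht ((PySem.Set.mem_ofList l _).mp hm))]
        have hc0 : List.count t l = 0 := List.count_eq_zero_of_not_mem ht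
        rw [List.countP_append]
        have hS : (PySem.Set.ofList l).countP (fun tok => PySem.List.count (l ++ [t]) tok == 1) =
            (PySem.Set.ofList l).countP (fun tok => PySem.List.count l tok == 1) := by
          refine List.countP_congr ?_
          intro x hx
          have hxt : x ≠ t := fun he => ht (he ▸ ((PySem.Set.mem_ofList l _).mp hx))
          simp only [PySem.List.count_eq, List.count_append]
          have : List.count x [t] = 0 := by
            simp [List.count_eq_zero, fun he => hxt he]
          rw [this, Nat.add_zero]
        have htq : List.countP (fun tok => PySem.List.count (l ++ [t]) tok == 1) [t] = 1 := by
          simp [PySem.List.count_eq, List.count_append, hc0]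
        rw [hS, htq, if_pos (by simp [hc0])]
        push_cast
        ring

theorem pvLoopA_eq (l : List String) (numToken : Int) :
    ∀ (fuel : Nat) (n : Int) (lv lh : List Int), (numToken - n).toNat ≤ fuel → 0 ≤ n →
      pvLoopA l numToken n lv lh =
        (lv ++ (PySem.List.pyRange n numToken 1000).map
            (fun m => ((PySem.Set.ofList (l.take m.toNat)).length : Int)),
         lh ++ (PySem.List.pyRange n numToken 1000).map
            (fun m => pvHapax (l.take m.toNat) (PySem.Set.ofList (l.take m.toNat)))) := by
  intro fuel
  induction fuel with
  | zero =>
    intro n lv lh hf hn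
    rw [pvLoopA, dif_neg (by omega), pvRange1000_nil _ _ (by omega)]
    simp
  | succ fuel ih =>
    intro n lv lh hf hn
    by_cases h : n < numToken
    · rw [pvLoopA, dif_pos h]
      rw [PySem.List.slice_to l hn]
      rw [ih (n + 1000) _ _ (by omega) (by omega)]
      rw [pvRange1000_cons n numToken h]
      simp [PySem.Set.len, List.append_assoc]
    · rw [pvLoopA, dif_neg h, pvRange1000_nil _ _ (by omega)]
      simp

theorem pvLoopB_eq (l : List String) (numToken : Int) :
    ∀ (fuel : Nat) (n i : Int) (lv lh : List Int) (cnt : PySem.Dict String Int) (d h : Int),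
      (numToken - n).toNat ≤ fuel → 0 ≤ i → i ≤ n →
      (cnt, d, h) = (l.take i.toNat).foldl pvStep (PySem.Dict.empty, 0, 0) →
      ((PySem.List.pyRange n numToken 1000).foldl (pvBStep l) (cnt, d, h, i, lv, lh)).2.2.2.2 =
        (lv ++ (PySem.List.pyRange n numToken 1000).map
            (fun m => ((PySem.Set.ofList (l.take m.toNat)).length : Int)),
         lh ++ (PySem.List.pyRange n numToken 1000).map
            (fun m => pvHapax (l.take m.toNat) (PySem.Set.ofList (l.take m.toNat)))) := by
  intro fuel
  induction fuel with
  | zero =>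
    intro n i lv lh cnt d h hf hi hin hst
    rw [pvRange1000_nil _ _ (by omega)]
    simp
  | succ fuel ih =>
    intro n i lv lh cnt d h hf hi hin hst
    by_cases hlt : n < numToken
    · have hn : (0:Int) ≤ n := le_trans hi hin
      have hfold : (PySem.List.slice l (some i) (some n)).foldl pvStep (cnt, d, h) =
          (l.take n.toNat).foldl pvStep (PySem.Dict.empty, 0, 0) := by
        rw [PySem.List.slice_toNat l hi hn, hst, ← List.foldl_append]
        congr 1
        rw [← List.take_add]
        congr 1
        omega
      rw [pvRange1000_cons n numToken hlt, List.foldl_cons]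
      have hstep : pvBStep l (cnt, d, h, i, lv, lh) n =
          (((l.take n.toNat).foldl pvStep (PySem.Dict.empty, 0, 0)).1,
           ((l.take n.toNat).foldl pvStep (PySem.Dict.empty, 0, 0)).2.1,
           ((l.take n.toNat).foldl pvStep (PySem.Dict.empty, 0, 0)).2.2, n,
           lv ++ [((l.take n.toNat).foldl pvStep (PySem.Dict.empty, 0, 0)).2.1],
           lh ++ [((l.take n.toNat).foldl pvStep (PySem.Dict.empty, 0, 0)).2.2]) := by
        unfold pvBStep
        rw [hfold]
      rw [hstep]
      rw [ih (n + 1000) n _ _ _ _ _ (by omega) hn (by omega) (by simp)]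
      rw [pvRun_spec (l.take n.toNat)]
      simp [List.append_assoc]
    · rw [pvRange1000_nil _ _ (by omega)]
      simp

-- ===== VERDICT (by name: the statement is the Claim_ definition above) =====
theorem calcolaVoc_Hapax_spec : Claim_equal_calcolaVoc_Hapax := by
  intro l numToken _
  unfold Spec_calcolaVoc_Hapax calcolaVoc_Hapax calcolaVoc_Hapax_alt
  have hB := pvLoopB_eq l numToken (numToken - 1000).toNat 1000 0 [] [] PySem.Dict.empty 0 0
      (by omega) (by norm_num) (by norm_num) (by simp)
  rw [pvLoopA_eq l numToken (numToken - 1000).toNat 1000 [] [] (by omega) (by norm_num), ← hB]
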